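-- pv_equiv track=rewrite | github.com/PiesAvalon/GraphPrior | components/_graphprior_core.py | lsh_cluster
-- ===== SOURCE A (Python) =====
-- class UnionFind:
--     def __init__(self, items: list[str]) -> None:
--         self.parent = {x: x for x in items}
--         self.rank = {x: 0 for x in items}
--
--     def find(self, x: str) -> str:
--         while self.parent[x] != x:
--             self.parent[x] = self.parent[self.parent[x]]
--             x = self.parent[x]
--         return x
--
--     def union(self, a: str, b: str) -> None:
--         ra, rb = self.find(a), self.find(b)
--         if ra == rb:
--             return
--         if self.rank[ra] < self.rank[rb]:
--             self.parent[ra] = rb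
--         elif self.rank[ra] > self.rank[rb]:
--             self.parent[rb] = ra
--         else:
--             self.parent[rb] = ra
--             self.rank[ra] += 1
--
-- def lsh_cluster(
--     case_ids: list[str],
--     signatures: dict[str, int],
--     bits: int = 64,
--     bands: int = 8,
--     min_band_collisions: int = 2,
-- ) -> list[list[str]]:
--     if bits % bands != 0:
--         raise ValueError("bits must be divisible by bands")
--
--     rows = bits // bands
--     uf = UnionFind(case_ids)
--     buckets: dict[tuple[int, int], list[str]] = {}
--     pair_hits: dict[tuple[str, str], int] = {}
--     mask = (1 << rows) - 1
--
--     for cid in case_ids: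
--         sig = signatures[cid]
--         for band in range(bands):
--             key_bits = (sig >> (band * rows)) & mask
--             key = (band, key_bits)
--             buckets.setdefault(key, []).append(cid)
--
--     for members in buckets.values():
--         if len(members) < 2:
--             continue
--         for i in range(len(members)):
--             for j in range(i + 1, len(members)):
--                 a = members[i]
--                 b = members[j]
--                 pair = (a, b) if a < b else (b, a)
--                 pair_hits[pair] = pair_hits.get(pair, 0) + 1
--
--     for (a, b), hit in pair_hits.items():
--         if hit >= min_band_collisions:
--             uf.union(a, b)
--
--     groups: dict[str, list[str]] = {}
--     for cid in case_ids:
--         root = uf.find(cid)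
--         groups.setdefault(root, []).append(cid)
--
--     clusters = [sorted(v) for v in groups.values()]
--     clusters.sort(key=lambda x: (len(x), x[0]), reverse=True)
--     return clusters
-- ===== SOURCE B (Python) =====
-- def lsh_cluster(
--     case_ids: list[str],
--     signatures: dict[str, int],
--     bits: int = 64,
--     bands: int = 8,
--     min_band_collisions: int = 2,
-- ) -> list[list[str]]:
--     if bits % bands != 0:
--         raise ValueError("bits must be divisible by bands")
--
--     rows = bits // bands
--     mask = (1 << rows) - 1
--
--     # band buckets, built over one flat (cid, band) stream
--     buckets: dict[tuple[int, int], list[str]] = {}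
--     for cid, band in ((c, b) for c in case_ids for b in range(bands)):
--         key = (band, (signatures[cid] >> (band * rows)) & mask)
--         buckets[key] = buckets.get(key, []) + [cid]
--
--     # count band collisions per unordered pair
--     pair_hits: dict[tuple[str, str], int] = {}
--     for members in buckets.values():
--         for i, a in enumerate(members):
--             for b in members[i + 1:]:
--                 pair = (min(a, b), max(a, b))
--                 pair_hits[pair] = pair_hits.get(pair, 0) + 1
--
--     # connected components by flat label relabelling (no union-find)
--     label = {cid: cid for cid in case_ids}
--     for (a, b), hit in pair_hits.items():
--         if hit >= min_band_collisions:
--             la, lb = label[a], label[b]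
--             if la != lb:
--                 label = {k: (la if v == lb else v) for k, v in label.items()}
--
--     groups: dict[str, list[str]] = {}
--     for cid in case_ids:
--         groups.setdefault(label[cid], []).append(cid)
--
--     clusters = [sorted(v) for v in groups.values()]
--     clusters.sort(key=lambda x: (len(x), x[0]), reverse=True)
--     return clusters
-- ===== Notes on version B (the rewrite author's own statement) =====
-- stated objective: alternative
-- what changed: B replaces A's UnionFind (path-halving find + union by rank) with flat component-label relabelling over a label dict, flattens bucket building over a single (cid, band) stream, and counts pair collisions via enumerate and list slices with min/max pair normalisation.
import Mathlib
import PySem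

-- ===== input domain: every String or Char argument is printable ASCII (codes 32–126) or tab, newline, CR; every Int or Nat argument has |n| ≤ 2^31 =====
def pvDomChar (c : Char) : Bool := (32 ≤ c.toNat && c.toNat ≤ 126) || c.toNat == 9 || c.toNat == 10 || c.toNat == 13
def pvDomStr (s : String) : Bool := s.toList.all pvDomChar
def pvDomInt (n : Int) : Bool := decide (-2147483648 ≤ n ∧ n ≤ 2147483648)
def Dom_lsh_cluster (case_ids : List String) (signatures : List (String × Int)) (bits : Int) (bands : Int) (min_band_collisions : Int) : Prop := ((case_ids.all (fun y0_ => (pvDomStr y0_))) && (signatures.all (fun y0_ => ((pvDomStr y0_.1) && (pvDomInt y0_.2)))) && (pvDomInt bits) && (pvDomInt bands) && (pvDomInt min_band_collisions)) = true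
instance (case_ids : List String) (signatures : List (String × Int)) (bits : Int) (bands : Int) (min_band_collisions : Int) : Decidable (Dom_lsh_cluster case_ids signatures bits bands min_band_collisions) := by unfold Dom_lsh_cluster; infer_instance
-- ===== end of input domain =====

-- B replaces A's union-find (path halving + union by rank) by flat label relabelling over a
-- dict of component labels; bucket/pair counting is restructured over a flat (cid, band)
-- stream and slices.  Objective: alternative (structurally different, similar cost).
-- A mutates nothing observable; equivalence is about the return value.

-- ===== PORT A =====
-- UnionFind.find with path halving; the Python while-loop is ported with fuel = parent.size
-- (under the union-find forest invariant the loop always terminates within `size` steps;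
-- proved in findA_spec below).  parent[x] is ported as getD x x: x is always a key here.
def findA (fuel : Nat) (parent : PySem.Dict String String) (x : String) :
    PySem.Dict String String × String :=
  match fuel with
  | 0 => (parent, x)
  | n+1 =>
    let px := parent.getD x x
    if px = x then (parent, x)
    else findA n (parent.insert x (parent.getD px px)) (parent.getD px px)

-- UnionFind.union (rank dict is the second component of the state)
def unionA (st : PySem.Dict String String × PySem.Dict String Int) (a b : String) :
    PySem.Dict String String × PySem.Dict String Int :=
  let fr := findA st.1.size st.1 a
  let fr2 := findA fr.1.size fr.1 b
  let p2 := fr2.1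
  let ra := fr.2
  let rb := fr2.2
  if ra = rb then (p2, st.2)
  else if st.2.getD ra 0 < st.2.getD rb 0 then (p2.insert ra rb, st.2)
  else if st.2.getD rb 0 < st.2.getD ra 0 then (p2.insert rb ra, st.2)
  else (p2.insert rb ra, (st.2.insert ra (st.2.getD ra 0 + 1)))

def lsh_cluster (case_ids : List String) (signatures : List (String × Int)) (bits : Int) (bands : Int) (min_band_collisions : Int) : List (List String) :=
  let sigd := PySem.Dict.ofList signatures
  let rows := PySem.Int.floordiv bits bands
  let parent0 : PySem.Dict String String := case_ids.foldl (fun d x => d.insert x x) .empty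
  let rank0 : PySem.Dict String Int := case_ids.foldl (fun d x => d.insert x 0) .empty
  let mask : Int := ((1:Int) <<< rows.toNat) - 1
  let buckets : PySem.Dict (Int × Int) (List String) :=
    case_ids.foldl (fun bks cid =>
      let sig := sigd.getD cid 0   -- signatures[cid]; KeyError excluded by Pre_
      (PySem.List.pyRange 0 bands 1).foldl (fun bks band =>
        let key_bits := PySem.Int.band (sig >>> (band * rows).toNat) mask
        bks.modify (band, key_bits) [] (· ++ [cid])) bks) .empty
  let pair_hits : PySem.Dict (String × String) Int :=
    buckets.values.foldl (fun ph members =>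
      if members.length < 2 then ph
      else (PySem.List.pyRange 0 (members.length : Int) 1).foldl (fun ph i =>
        (PySem.List.pyRange (i+1) (members.length : Int) 1).foldl (fun ph j =>
          let a := PySem.List.pyGetD members i ""
          let b := PySem.List.pyGetD members j ""
          let pair := if a < b then (a, b) else (b, a)
          ph.modify pair 0 (· + 1)) ph) ph) .empty
  let uf := pair_hits.items.foldl (fun st it =>
      if min_band_collisions ≤ it.2 then unionA st it.1.1 it.1.2 else st) (parent0, rank0)
  let fin := case_ids.foldl
      (fun (st : PySem.Dict String String × PySem.Dict String (List String)) cid =>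
        let fr := findA st.1.size st.1 cid
        (fr.1, st.2.modify fr.2 [] (· ++ [cid]))) (uf.1, .empty)
  let clusters := fin.2.values.map (fun v => PySem.List.sorted v (fun x => x) false)
  PySem.List.sorted2 clusters (fun x => (x.length : Int)) (fun x => PySem.List.pyGetD x 0 "") true

-- ===== PORT B =====
-- the dict comprehension {k: (la if v == lb else v) for k, v in label.items()}
def relabelB (l : PySem.Dict String String) (la lb : String) : PySem.Dict String String :=
  l.items.foldl (fun acc p => acc.insert p.1 (if p.2 = lb then la else p.2)) .empty

def lsh_cluster_alt (case_ids : List String) (signatures : List (String × Int)) (bits : Int) (bands : Int) (min_band_collisions : Int) : List (List String) :=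
  let sigd := PySem.Dict.ofList signatures
  let rows := PySem.Int.floordiv bits bands
  let mask : Int := ((1:Int) <<< rows.toNat) - 1
  let buckets : PySem.Dict (Int × Int) (List String) :=
    (case_ids.flatMap (fun c => (PySem.List.pyRange 0 bands 1).map (fun b => (c, b)))).foldl
      (fun bks cb =>
        let key := (cb.2, PySem.Int.band (sigd.getD cb.1 0 >>> (cb.2 * rows).toNat) mask)
        bks.insert key (bks.getD key [] ++ [cb.1])) .empty
  let pair_hits : PySem.Dict (String × String) Int :=
    buckets.values.foldl (fun ph members =>
      (PySem.List.enumerate members 0).foldl (fun ph ia =>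
        (PySem.List.slice members (some (ia.1 + 1)) none).foldl (fun ph b =>
          let pair := (min ia.2 b, max ia.2 b)
          ph.insert pair (ph.getD pair 0 + 1)) ph) ph) .empty
  let label0 : PySem.Dict String String := case_ids.foldl (fun d c => d.insert c c) .empty
  let label := pair_hits.items.foldl (fun l it =>
      if min_band_collisions ≤ it.2 then
        let la := l.getD it.1.1 ""    -- label[a]; a is always a key
        let lb := l.getD it.1.2 ""
        if la = lb then l else relabelB l la lb
      else l) label0
  let groups : PySem.Dict String (List String) :=
    case_ids.foldl (fun g cid => g.modify (label.getD cid "") [] (· ++ [cid])) .empty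
  let clusters := groups.values.map (fun v => PySem.List.sorted v (fun x => x) false)
  PySem.List.sorted2 clusters (fun x => (x.length : Int)) (fun x => PySem.List.pyGetD x 0 "") true

-- ===== PRECONDITION & SPEC =====
-- Pre_ excludes exactly the inputs on which A raises: bands = 0 (ZeroDivisionError),
-- bits not divisible by bands (the explicit ValueError), a negative shift amount
-- rows = bits // bands < 0 (ValueError on <<, >>), and a case id missing from
-- signatures (KeyError).
def Pre_lsh_cluster (case_ids : List String) (signatures : List (String × Int)) (bits : Int) (bands : Int) (min_band_collisions : Int) : Prop :=
  bands ≠ 0 ∧ PySem.Int.mod bits bands = 0 ∧ 0 ≤ PySem.Int.floordiv bits bands ∧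
    ∀ cid ∈ case_ids, cid ∈ signatures.map Prod.fst
instance (case_ids : List String) (signatures : List (String × Int)) (bits : Int) (bands : Int) (min_band_collisions : Int) : Decidable (Pre_lsh_cluster case_ids signatures bits bands min_band_collisions) := by unfold Pre_lsh_cluster; infer_instance

def pvWitness_lsh_cluster : List String × (List (String × Int)) × Int × Int × Int :=
  (["a", "b"], [("a", 3), ("b", 3)], 4, 2, 1)

def Spec_lsh_cluster (case_ids : List String) (signatures : List (String × Int)) (bits : Int) (bands : Int) (min_band_collisions : Int) (out : List (List String)) : Prop := out = lsh_cluster_alt case_ids signatures bits bands min_band_collisions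
instance (case_ids : List String) (signatures : List (String × Int)) (bits : Int) (bands : Int) (min_band_collisions : Int) (out : List (List String)) : Decidable (Spec_lsh_cluster case_ids signatures bits bands min_band_collisions out) := by unfold Spec_lsh_cluster; infer_instance

-- ===== CLAIM (what is proved, stated in full; the proofs are below) =====
def Claim_equal_lsh_cluster : Prop := ∀ (case_ids : List String) (signatures : List (String × Int)) (bits : Int) (bands : Int) (min_band_collisions : Int), Dom_lsh_cluster case_ids signatures bits bands min_band_collisions → Pre_lsh_cluster case_ids signatures bits bands min_band_collisions → Spec_lsh_cluster case_ids signatures bits bands min_band_collisions (lsh_cluster case_ids signatures bits bands min_band_collisions)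

-- ===== LEMMAS AND PROOFS =====

theorem pvWitness_ok : Dom_lsh_cluster pvWitness_lsh_cluster.1 pvWitness_lsh_cluster.2.1 pvWitness_lsh_cluster.2.2.1 pvWitness_lsh_cluster.2.2.2.1 pvWitness_lsh_cluster.2.2.2.2 ∧ Pre_lsh_cluster pvWitness_lsh_cluster.1 pvWitness_lsh_cluster.2.1 pvWitness_lsh_cluster.2.2.1 pvWitness_lsh_cluster.2.2.2.1 pvWitness_lsh_cluster.2.2.2.2 := by
  constructor <;> decide

-- ---- the abstract parent-chain (A side) ----
def ufStep (d : PySem.Dict String String) (x : String) : String := d.getD x x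
def ufIter (d : PySem.Dict String String) : Nat → String → String
  | 0, x => x
  | (k+1), x => ufIter d k (ufStep d x)
def isRoot (d : PySem.Dict String String) (x : String) : Prop := ufStep d x = x
def Reach (d : PySem.Dict String String) (x r : String) : Prop :=
  (∃ k, ufIter d k x = r) ∧ isRoot d r
def Good (K : List String) (d : PySem.Dict String String) : Prop :=
  d.keys = K ∧ (∀ y ∈ K, ufStep d y ∈ K) ∧ ∀ y, ∃ r, Reach d y r
def RootEq (d : PySem.Dict String String) (x y : String) : Prop :=
  ∃ r, Reach d x r ∧ Reach d y r
def mergeRel (R : String → String → Prop) (a b x y : String) : Prop :=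
  R x y ∨ (R x a ∧ R b y) ∨ (R x b ∧ R a y)
def valEq (l : PySem.Dict String String) (x y : String) : Prop :=
  l.getD x x = l.getD y y

theorem ufIter_succ_out (d : PySem.Dict String String) (k : Nat) (x : String) :
    ufIter d (k+1) x = ufStep d (ufIter d k x) := by
  induction k generalizing x with
  | zero => rfl
  | succ n ih => simpa [ufIter] using ih (ufStep d x)

theorem ufIter_add (d : PySem.Dict String String) (k j : Nat) (x : String) :
    ufIter d (k + j) x = ufIter d j (ufIter d k x) := by
  induction j with
  | zero => rfl
  | succ n ih => rw [← Nat.add_assoc, ufIter_succ_out, ih, ← ufIter_succ_out]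

theorem isRoot_iter {d : PySem.Dict String String} {r : String} (h : isRoot d r) (k : Nat) :
    ufIter d k r = r := by
  induction k with
  | zero => rfl
  | succ n ih => rw [ufIter_succ_out, ih, h]

theorem reach_unique {d : PySem.Dict String String} {x r r' : String}
    (h : Reach d x r) (h' : Reach d x r') : r = r' := by
  obtain ⟨⟨k, hk⟩, hr⟩ := h
  obtain ⟨⟨k', hk'⟩, hr'⟩ := h'
  rcases Nat.le_total k k' with hle | hle
  · have := ufIter_add d k (k' - k) x
    rw [Nat.add_sub_cancel' hle] at this
    rw [hk, isRoot_iter hr] at this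
    rw [← hk', ← this]
  · have := ufIter_add d k' (k - k') x
    rw [Nat.add_sub_cancel' hle] at this
    rw [hk', isRoot_iter hr'] at this
    rw [← hk, ← this]

theorem mem_keys_of_not_isRoot {d : PySem.Dict String String} {z : String}
    (h : ¬ isRoot d z) : z ∈ d.keys := by
  by_contra hz
  apply h
  have hc : d.contains z = false := by
    rw [PySem.Dict.contains_eq_decide_mem_keys]; simpa using hz
  exact PySem.Dict.getD_of_not_contains d z hc

theorem ufStep_insert (d : PySem.Dict String String) (u v z : String) :
    ufStep (d.insert u v) z = if z = u then v else ufStep d z := by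
  simp [ufStep, PySem.Dict.getD_insert]

-- ---- path halving preserves roots and reachability ----
theorem halve_iter (d : PySem.Dict String String) (x0 : String) (k : Nat) (y : String) :
    ∃ m, k ≤ m ∧ ufIter (d.insert x0 (ufStep d (ufStep d x0))) k y = ufIter d m y := by
  induction k with
  | zero => exact ⟨0, Nat.le_refl 0, rfl⟩
  | succ n ih =>
    obtain ⟨m, hnm, hm⟩ := ih
    rw [ufIter_succ_out, hm, ufStep_insert]
    by_cases hx : ufIter d m y = x0
    · refine ⟨m + 2, by omega, ?_⟩
      rw [if_pos hx, ufIter_succ_out, ufIter_succ_out, hx]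
    · exact ⟨m + 1, by omega, by rw [if_neg hx, ufIter_succ_out]⟩

theorem halve_isRoot {d : PySem.Dict String String} {r : String} (x0 : String)
    (h : isRoot d r) : isRoot (d.insert x0 (ufStep d (ufStep d x0))) r := by
  unfold isRoot at *
  rw [ufStep_insert]
  by_cases hx : r = x0
  · rw [if_pos hx, ← hx, h, h]
  · rw [if_neg hx, h]

theorem halve_reach {d : PySem.Dict String String} {y r : String} (x0 : String)
    (h : Reach d y r) : Reach (d.insert x0 (ufStep d (ufStep d x0))) y r := by
  obtain ⟨⟨k, hk⟩, hr⟩ := h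
  obtain ⟨m, hkm, hm⟩ := halve_iter d x0 k y
  refine ⟨⟨k, ?_⟩, halve_isRoot x0 hr⟩
  rw [hm]
  have := ufIter_add d k (m - k) y
  rw [Nat.add_sub_cancel' hkm] at this
  rw [this, hk, isRoot_iter hr]

theorem halve_reach_iff {d : PySem.Dict String String} (x0 : String)
    (htot : ∀ z, ∃ r, Reach d z r) (y r : String) :
    Reach (d.insert x0 (ufStep d (ufStep d x0))) y r ↔ Reach d y r := by
  constructor
  · intro h
    obtain ⟨r0, hr0⟩ := htot y
    have h2 := halve_reach x0 hr0
    rwa [reach_unique h h2]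
  · exact halve_reach x0

-- ---- linking one root under another ----
theorem link_iter_eq {d : PySem.Dict String String} {r1 : String} (r2 : String)
    {y r : String} (hr1 : isRoot d r1) (h : Reach d y r) (hne : r ≠ r1) :
    Reach (d.insert r1 r2) y r := by
  obtain ⟨⟨k, hk⟩, hr⟩ := h
  have hnot : ∀ j, j ≤ k → ufIter d j y ≠ r1 := by
    intro j hj hcon
    apply hne
    have := ufIter_add d j (k - j) y
    rw [Nat.add_sub_cancel' hj] at this
    rw [← hk, this, hcon, isRoot_iter hr1]
  have haux : ∀ j, j ≤ k → ufIter (d.insert r1 r2) j y = ufIter d j y := by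
    intro j hj
    induction j with
    | zero => rfl
    | succ n ih =>
      rw [ufIter_succ_out, ufIter_succ_out, ih (by omega), ufStep_insert,
        if_neg (hnot n (by omega))]
  refine ⟨⟨k, by rw [haux k (Nat.le_refl k), hk]⟩, ?_⟩
  unfold isRoot
  rw [ufStep_insert, if_neg hne, hr]

theorem link_reach_r1 {d : PySem.Dict String String} {r1 r2 : String} {y : String}
    (_hr1 : isRoot d r1) (hr2 : isRoot d r2) (hne : r1 ≠ r2)
    (h : Reach d y r1) : Reach (d.insert r1 r2) y r2 := by
  have hex : ∃ j, ufIter d j y = r1 := h.1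
  have hmin : ∀ j, j < Nat.find hex → ufIter d j y ≠ r1 := fun j hj => Nat.find_min hex hj
  have hspec := Nat.find_spec hex
  have haux : ∀ j, j ≤ Nat.find hex → ufIter (d.insert r1 r2) j y = ufIter d j y := by
    intro j hj
    induction j with
    | zero => rfl
    | succ n ih =>
      rw [ufIter_succ_out, ufIter_succ_out, ih (by omega), ufStep_insert,
        if_neg (hmin n (by omega))]
  refine ⟨⟨Nat.find hex + 1, ?_⟩, ?_⟩
  · rw [ufIter_succ_out, haux _ (Nat.le_refl _), hspec, ufStep_insert, if_pos rfl]
  · unfold isRoot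
    rw [ufStep_insert, if_neg (Ne.symm hne), hr2]

theorem link_reach_iff {d : PySem.Dict String String} {r1 r2 : String}
    (hr1 : isRoot d r1) (hr2 : isRoot d r2) (hne : r1 ≠ r2)
    (htot : ∀ z, ∃ r, Reach d z r) (y r' : String) :
    Reach (d.insert r1 r2) y r' ↔ ∃ r, Reach d y r ∧ r' = if r = r1 then r2 else r := by
  constructor
  · intro h'
    obtain ⟨r, hr⟩ := htot y
    have h2 : Reach (d.insert r1 r2) y (if r = r1 then r2 else r) := by
      by_cases hc : r = r1
      · rw [if_pos hc]; exact link_reach_r1 hr1 hr2 hne (hc ▸ hr)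
      · rw [if_neg hc]; exact link_iter_eq r2 hr1 hr hc
    exact ⟨r, hr, reach_unique h' h2⟩
  · rintro ⟨r, hr, rfl⟩
    by_cases hc : r = r1
    · rw [if_pos hc]; exact link_reach_r1 hr1 hr2 hne (hc ▸ hr)
    · rw [if_neg hc]; exact link_iter_eq r2 hr1 hr hc

-- ---- depth is bounded by the number of keys ----
theorem iter_mem {K : List String} {d : PySem.Dict String String} (hg : Good K d)
    {x : String} (hx : x ∈ K) (k : Nat) : ufIter d k x ∈ K := by
  induction k with
  | zero => exact hx
  | succ n ih => rw [ufIter_succ_out]; exact hg.2.1 _ ih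

theorem good_depth {K : List String} {d : PySem.Dict String String} (_hK : K.Nodup)
    (hg : Good K d) (x : String) : ∃ k ≤ K.length, isRoot d (ufIter d k x) := by
  obtain ⟨r, ⟨⟨k0, hk0⟩, hr⟩⟩ := hg.2.2 x
  have hex : ∃ k, ufStep d (ufIter d k x) = ufIter d k x := ⟨k0, by rw [hk0]; exact hr⟩
  have hspec : ufStep d (ufIter d (Nat.find hex) x) = ufIter d (Nat.find hex) x :=
    Nat.find_spec hex
  have hmin : ∀ j, j < Nat.find hex → ufStep d (ufIter d j x) ≠ ufIter d j x :=
    fun j hj => Nat.find_min hex hj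
  set n := Nat.find hex with hn
  rcases Nat.eq_zero_or_pos n with h0 | hpos
  · refine ⟨0, Nat.zero_le _, ?_⟩
    have := hspec; rw [h0] at this; exact this
  · have key : ∀ i j, i < j → j ≤ n → ufIter d i x = ufIter d j x → False := by
      intro i j hij hjn heq
      have h1 : ufIter d (i + (n - j)) x = ufIter d n x := by
        rw [ufIter_add, heq, ← ufIter_add, Nat.add_sub_cancel' hjn]
      exact hmin (i + (n - j)) (by omega) (by rw [h1]; exact hspec)
    have hinj : ∀ i ∈ List.range (n+1), ∀ j ∈ List.range (n+1),
        ufIter d i x = ufIter d j x → i = j := by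
      intro i hi j hj hij
      rw [List.mem_range] at hi hj
      by_contra hne
      rcases Nat.lt_or_ge i j with hlt | hge
      · exact key i j hlt (by omega) hij
      · exact key j i (by omega) (by omega) hij.symm
    have hnd : ((List.range (n+1)).map (fun i => ufIter d i x)).Nodup :=
      List.Nodup.map_on hinj (List.nodup_range)
    have hsub : ∀ z ∈ (List.range (n+1)).map (fun i => ufIter d i x), z ∈ K := by
      intro z hz
      obtain ⟨i, hi, rfl⟩ := List.mem_map.mp hz
      rw [List.mem_range] at hi
      rcases Nat.lt_or_ge i n with hin | hin
      · have hm := mem_keys_of_not_isRoot (hmin i hin)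
        rwa [hg.1] at hm
      · have hie : i = n := by omega
        have h1 : ufIter d i x = ufStep d (ufIter d (i-1) x) := by
          rw [← ufIter_succ_out]; congr 1; omega
        rw [h1]
        apply hg.2.1
        have hm := mem_keys_of_not_isRoot (hmin (i-1) (by omega))
        rwa [hg.1] at hm
    have hlen := (List.Nodup.subperm hnd hsub).length_le
    rw [List.length_map, List.length_range] at hlen
    exact ⟨n, by omega, hspec⟩

theorem dict_size_eq_keys_length (d : PySem.Dict String String) : d.size = d.keys.length := by
  simp [PySem.Dict.size, PySem.Dict.keys]

-- ---- findA meets its specification ----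
theorem findA_spec {K : List String} (_hK : K.Nodup) :
    ∀ (fuel : Nat) (d : PySem.Dict String String) (x : String), Good K d →
      (∃ k ≤ fuel, isRoot d (ufIter d k x)) →
      Good K (findA fuel d x).1 ∧ Reach d x (findA fuel d x).2 ∧
        (∀ y r, Reach (findA fuel d x).1 y r ↔ Reach d y r) := by
  intro fuel
  induction fuel with
  | zero =>
    intro d x hg hdep
    obtain ⟨k, hk, hroot⟩ := hdep
    have hk0 : k = 0 := Nat.le_zero.mp hk
    subst hk0
    exact ⟨hg, ⟨⟨0, rfl⟩, hroot⟩, fun y r => Iff.rfl⟩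
  | succ n ih =>
    intro d x hg hdep
    by_cases hpx : d.getD x x = x
    · have hres : findA (n+1) d x = (d, x) := by simp [findA, hpx]
      rw [hres]
      exact ⟨hg, ⟨⟨0, rfl⟩, hpx⟩, fun y r => Iff.rfl⟩
    · have hres : findA (n+1) d x
          = findA n (d.insert x (ufStep d (ufStep d x))) (ufStep d (ufStep d x)) := by
        simp [findA, hpx]; rfl
      have hxK : x ∈ K := by rw [← hg.1]; exact mem_keys_of_not_isRoot hpx
      have hg' : Good K (d.insert x (ufStep d (ufStep d x))) := by
        refine ⟨?_, ?_, ?_⟩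
        · rw [PySem.Dict.keys_insert_of_contains]
          · exact hg.1
          · exact (PySem.Dict.contains_iff_mem_keys d x).mpr (hg.1 ▸ hxK)
        · intro y hy
          rw [ufStep_insert]
          by_cases hyx : y = x
          · rw [if_pos hyx]; exact hg.2.1 _ (hg.2.1 _ hxK)
          · rw [if_neg hyx]; exact hg.2.1 _ hy
        · intro y
          obtain ⟨r, hr⟩ := hg.2.2 y
          exact ⟨r, halve_reach x hr⟩
      obtain ⟨k, hk, hroot⟩ := hdep
      have hkpos : k ≠ 0 := by intro h0; subst h0; exact hpx hroot
      have hdep' : ∃ k' ≤ n,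
          isRoot (d.insert x (ufStep d (ufStep d x))) (ufIter (d.insert x (ufStep d (ufStep d x))) k' (ufStep d (ufStep d x))) := by
        rcases Nat.lt_or_ge k 2 with hk2 | hk2
        · have hk1 : k = 1 := by omega
          subst hk1
          have hroot1 : ufStep d (ufStep d x) = ufStep d x := hroot
          refine ⟨0, Nat.zero_le _, ?_⟩
          show isRoot (d.insert x (ufStep d (ufStep d x))) (ufStep d (ufStep d x))
          have hx' : isRoot d (ufStep d (ufStep d x)) := by
            show ufStep d (ufStep d (ufStep d x)) = ufStep d (ufStep d x)
            simp only [hroot1]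
          exact halve_isRoot x hx'
        · have heq : ufIter d (k - 2) (ufStep d (ufStep d x)) = ufIter d k x := by
            have h2 := ufIter_add d 2 (k-2) x
            have h3 : 2 + (k - 2) = k := by omega
            rw [h3] at h2
            exact h2.symm
          obtain ⟨m, hm, hmeq⟩ := halve_iter d x (k-2) (ufStep d (ufStep d x))
          refine ⟨k - 2, by omega, ?_⟩
          have habs : ufIter d m (ufStep d (ufStep d x)) = ufIter d k x := by
            have h3 := ufIter_add d (k-2) (m - (k-2)) (ufStep d (ufStep d x))
            rw [Nat.add_sub_cancel' hm] at h3
            rw [h3, heq, isRoot_iter hroot]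
          rw [hmeq, habs]
          exact halve_isRoot x hroot
      obtain ⟨hgr, hreach, hiff⟩ := ih (d.insert x (ufStep d (ufStep d x))) (ufStep d (ufStep d x)) hg' hdep'
      rw [hres]
      refine ⟨hgr, ?_, ?_⟩
      · have h1 : Reach d (ufStep d (ufStep d x))
            (findA n (d.insert x (ufStep d (ufStep d x))) (ufStep d (ufStep d x))).2 :=
          (halve_reach_iff x hg.2.2 _ _).mp hreach
        obtain ⟨⟨j, hj⟩, hr⟩ := h1
        exact ⟨⟨2 + j, by rw [ufIter_add]; exact hj⟩, hr⟩
      · intro y r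
        rw [hiff y r, halve_reach_iff x hg.2.2]

-- ---- unionA merges exactly the two classes ----
theorem rootEq_symm {d : PySem.Dict String String} {x y : String} (h : RootEq d x y) :
    RootEq d y x := by obtain ⟨r, h1, h2⟩ := h; exact ⟨r, h2, h1⟩

theorem rootEq_trans {d : PySem.Dict String String} {x y z : String}
    (h : RootEq d x y) (h' : RootEq d y z) : RootEq d x z := by
  obtain ⟨r, h1, h2⟩ := h; obtain ⟨r', h3, h4⟩ := h'
  exact ⟨r, h1, (reach_unique h3 h2 ▸ h4 : Reach d z r)⟩

theorem mergeRel_self {d : PySem.Dict String String} {a b x y : String}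
    (hab : RootEq d a b) : mergeRel (RootEq d) a b x y ↔ RootEq d x y := by
  unfold mergeRel
  constructor
  · rintro (h | ⟨h1, h2⟩ | ⟨h1, h2⟩)
    · exact h
    · exact rootEq_trans h1 (rootEq_trans hab h2)
    · exact rootEq_trans h1 (rootEq_trans (rootEq_symm hab) h2)
  · exact Or.inl

theorem mergeRel_comm (R : String → String → Prop) (a b x y : String) :
    mergeRel R a b x y ↔ mergeRel R b a x y := by
  unfold mergeRel; tauto

theorem mergeRel_congr {R S : String → String → Prop} {a b x y : String}
    (h : ∀ u v, R u v ↔ S u v) : mergeRel R a b x y ↔ mergeRel S a b x y := by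
  unfold mergeRel; rw [h, h, h, h, h]

theorem link_rootEq1 {d : PySem.Dict String String} {a b ra rb : String}
    (htot : ∀ z, ∃ r, Reach d z r)
    (ha : Reach d a ra) (hb : Reach d b rb) (hne : ra ≠ rb) (x y : String) :
    RootEq (d.insert ra rb) x y ↔ mergeRel (RootEq d) a b x y := by
  have hra : isRoot d ra := ha.2
  have hrb : isRoot d rb := hb.2
  constructor
  · rintro ⟨r, hx', hy'⟩
    rw [link_reach_iff hra hrb hne htot] at hx' hy'
    obtain ⟨rx, hrx, hfx⟩ := hx'
    obtain ⟨ry, hry, hfy⟩ := hy'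
    have hff : (if rx = ra then rb else rx) = (if ry = ra then rb else ry) := by
      rw [← hfx, ← hfy]
    by_cases hxy : rx = ry
    · exact Or.inl ⟨rx, hrx, hxy ▸ hry⟩
    · by_cases h1 : rx = ra
      · rw [if_pos h1] at hff
        by_cases h2 : ry = ra
        · exact absurd (h1.trans h2.symm) hxy
        · rw [if_neg h2] at hff
          exact Or.inr (Or.inl ⟨⟨ra, h1 ▸ hrx, ha⟩, ⟨rb, hb, hff ▸ hry⟩⟩)
      · rw [if_neg h1] at hff
        by_cases h2 : ry = ra
        · rw [if_pos h2] at hff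
          exact Or.inr (Or.inr ⟨⟨rb, hff ▸ hrx, hb⟩, ⟨ra, ha, h2 ▸ hry⟩⟩)
        · rw [if_neg h2] at hff
          exact absurd hff hxy
  · rintro (⟨r, hxr, hyr⟩ | ⟨⟨r, hxr, har⟩, ⟨r', hbr', hyr'⟩⟩ | ⟨⟨r, hxr, hbr⟩, ⟨r', har', hyr'⟩⟩)
    · refine ⟨if r = ra then rb else r, ?_, ?_⟩
      · rw [link_reach_iff hra hrb hne htot]; exact ⟨r, hxr, rfl⟩
      · rw [link_reach_iff hra hrb hne htot]; exact ⟨r, hyr, rfl⟩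
    · have hr : r = ra := reach_unique har ha
      have hr' : r' = rb := reach_unique hbr' hb
      refine ⟨rb, ?_, ?_⟩
      · exact link_reach_r1 hra hrb hne (hr ▸ hxr)
      · exact link_iter_eq rb hra (hr' ▸ hyr') (Ne.symm hne)
    · have hr : r = rb := reach_unique hbr hb
      have hr' : r' = ra := reach_unique har' ha
      refine ⟨rb, ?_, ?_⟩
      · exact link_iter_eq rb hra (hr ▸ hxr) (Ne.symm hne)
      · exact link_reach_r1 hra hrb hne (hr' ▸ hyr')

theorem link_rootEq {d : PySem.Dict String String} {a b ra rb r1 r2 : String}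
    (htot : ∀ z, ∃ r, Reach d z r)
    (ha : Reach d a ra) (hb : Reach d b rb) (hne : ra ≠ rb)
    (hor : (r1 = ra ∧ r2 = rb) ∨ (r1 = rb ∧ r2 = ra)) (x y : String) :
    RootEq (d.insert r1 r2) x y ↔ mergeRel (RootEq d) a b x y := by
  rcases hor with ⟨h1, h2⟩ | ⟨h1, h2⟩
  · subst h1; subst h2; exact link_rootEq1 htot ha hb hne x y
  · subst h1; subst h2
    exact (link_rootEq1 htot hb ha (Ne.symm hne) x y).trans
      (mergeRel_comm (RootEq d) b a x y)

theorem unionA_spec {K : List String} (hK : K.Nodup)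
    (st : PySem.Dict String String × PySem.Dict String Int) (hg : Good K st.1)
    {a b : String} (haK : a ∈ K) (hbK : b ∈ K) :
    Good K (unionA st a b).1 ∧
      ∀ x y, RootEq (unionA st a b).1 x y ↔ mergeRel (RootEq st.1) a b x y := by
  have hsz1 : st.1.size = K.length := by rw [dict_size_eq_keys_length, hg.1]
  obtain ⟨hg1, hra, hiff1⟩ :=
    findA_spec hK st.1.size st.1 a hg (by rw [hsz1]; exact good_depth hK hg a)
  have hsz2 : (findA st.1.size st.1 a).1.size = K.length := by
    rw [dict_size_eq_keys_length, hg1.1]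
  obtain ⟨hg2, hrb', hiff2⟩ :=
    findA_spec hK (findA st.1.size st.1 a).1.size (findA st.1.size st.1 a).1 b hg1
      (by rw [hsz2]; exact good_depth hK hg1 b)
  have hrbst : Reach st.1 b (findA (findA st.1.size st.1 a).1.size (findA st.1.size st.1 a).1 b).2 :=
    (hiff1 _ _).mp hrb'
  have hiffp2 : ∀ y r,
      Reach (findA (findA st.1.size st.1 a).1.size (findA st.1.size st.1 a).1 b).1 y r ↔
        Reach st.1 y r := fun y r => (hiff2 y r).trans (hiff1 y r)
  have hrootEqp2 : ∀ x y,
      RootEq (findA (findA st.1.size st.1 a).1.size (findA st.1.size st.1 a).1 b).1 x y ↔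
        RootEq st.1 x y := by
    intro x y
    exact exists_congr fun r => and_congr (hiffp2 x r) (hiffp2 y r)
  have hraK : (findA st.1.size st.1 a).2 ∈ K := by
    obtain ⟨⟨k, hk⟩, _⟩ := hra
    rw [← hk]; exact iter_mem hg haK k
  have hrbK : (findA (findA st.1.size st.1 a).1.size (findA st.1.size st.1 a).1 b).2 ∈ K := by
    obtain ⟨⟨k, hk⟩, _⟩ := hrbst
    rw [← hk]; exact iter_mem hg hbK k
  have hrap2 : Reach (findA (findA st.1.size st.1 a).1.size (findA st.1.size st.1 a).1 b).1 a
      (findA st.1.size st.1 a).2 := (hiffp2 _ _).mpr hra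
  have hrbp2 : Reach (findA (findA st.1.size st.1 a).1.size (findA st.1.size st.1 a).1 b).1 b
      (findA (findA st.1.size st.1 a).1.size (findA st.1.size st.1 a).1 b).2 :=
    (hiffp2 _ _).mpr hrbst
  by_cases hab : (findA st.1.size st.1 a).2 =
      (findA (findA st.1.size st.1 a).1.size (findA st.1.size st.1 a).1 b).2
  · have hres : unionA st a b =
        ((findA (findA st.1.size st.1 a).1.size (findA st.1.size st.1 a).1 b).1, st.2) := by
      simp [unionA, hab]
    rw [hres]
    refine ⟨hg2, fun x y => (hrootEqp2 x y).trans (mergeRel_self ?_).symm⟩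
    exact ⟨(findA st.1.size st.1 a).2, hra, hab ▸ hrbst⟩
  · have main : ∀ r1 r2,
        (r1 = (findA st.1.size st.1 a).2 ∧
          r2 = (findA (findA st.1.size st.1 a).1.size (findA st.1.size st.1 a).1 b).2) ∨
        (r1 = (findA (findA st.1.size st.1 a).1.size (findA st.1.size st.1 a).1 b).2 ∧
          r2 = (findA st.1.size st.1 a).2) →
        Good K ((findA (findA st.1.size st.1 a).1.size (findA st.1.size st.1 a).1 b).1.insert r1 r2) ∧
        ∀ x y, RootEq ((findA (findA st.1.size st.1 a).1.size (findA st.1.size st.1 a).1 b).1.insert r1 r2) x y ↔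
          mergeRel (RootEq st.1) a b x y := by
      intro r1 r2 hor
      have hr1K : r1 ∈ K := by rcases hor with ⟨h1, _⟩ | ⟨h1, _⟩ <;> rw [h1] <;> assumption
      have hr2K : r2 ∈ K := by rcases hor with ⟨_, h2⟩ | ⟨_, h2⟩ <;> rw [h2] <;> assumption
      have hr1root : isRoot (findA (findA st.1.size st.1 a).1.size (findA st.1.size st.1 a).1 b).1 r1 := by
        rcases hor with ⟨h1, _⟩ | ⟨h1, _⟩ <;> rw [h1]
        · exact hrap2.2
        · exact hrbp2.2
      have hr2root : isRoot (findA (findA st.1.size st.1 a).1.size (findA st.1.size st.1 a).1 b).1 r2 := by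
        rcases hor with ⟨_, h2⟩ | ⟨_, h2⟩ <;> rw [h2]
        · exact hrbp2.2
        · exact hrap2.2
      have hne12 : r1 ≠ r2 := by
        rcases hor with ⟨h1, h2⟩ | ⟨h1, h2⟩ <;> rw [h1, h2]
        · exact hab
        · exact Ne.symm hab
      refine ⟨⟨?_, ?_, ?_⟩, ?_⟩
      · rw [PySem.Dict.keys_insert_of_contains]
        · exact hg2.1
        · exact (PySem.Dict.contains_iff_mem_keys _ r1).mpr (hg2.1 ▸ hr1K)
      · intro y hy
        rw [ufStep_insert]
        by_cases hyr : y = r1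
        · rw [if_pos hyr]; exact hr2K
        · rw [if_neg hyr]; exact hg2.2.1 _ hy
      · intro y
        obtain ⟨r, hr⟩ := hg2.2.2 y
        refine ⟨if r = r1 then r2 else r, ?_⟩
        rw [link_reach_iff hr1root hr2root hne12 hg2.2.2]
        exact ⟨r, hr, rfl⟩
      · intro x y
        exact (link_rootEq hg2.2.2 hrap2 hrbp2 hab hor x y).trans (mergeRel_congr hrootEqp2)
    have hres : unionA st a b = (if st.2.getD (findA st.1.size st.1 a).2 0 <
          st.2.getD (findA (findA st.1.size st.1 a).1.size (findA st.1.size st.1 a).1 b).2 0 then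
        ((findA (findA st.1.size st.1 a).1.size (findA st.1.size st.1 a).1 b).1.insert
          (findA st.1.size st.1 a).2
          (findA (findA st.1.size st.1 a).1.size (findA st.1.size st.1 a).1 b).2, st.2)
      else if st.2.getD (findA (findA st.1.size st.1 a).1.size (findA st.1.size st.1 a).1 b).2 0 <
          st.2.getD (findA st.1.size st.1 a).2 0 then
        ((findA (findA st.1.size st.1 a).1.size (findA st.1.size st.1 a).1 b).1.insert
          (findA (findA st.1.size st.1 a).1.size (findA st.1.size st.1 a).1 b).2
          (findA st.1.size st.1 a).2, st.2)
      else
        ((findA (findA st.1.size st.1 a).1.size (findA st.1.size st.1 a).1 b).1.insert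
          (findA (findA st.1.size st.1 a).1.size (findA st.1.size st.1 a).1 b).2
          (findA st.1.size st.1 a).2,
          st.2.insert (findA st.1.size st.1 a).2 (st.2.getD (findA st.1.size st.1 a).2 0 + 1))) := by
      simp [unionA, hab]
    rw [hres]
    split
    · exact main _ _ (Or.inl ⟨rfl, rfl⟩)
    · split
      · exact main _ _ (Or.inr ⟨rfl, rfl⟩)
      · exact main _ _ (Or.inr ⟨rfl, rfl⟩)

-- ---- the initial parent dict is the identity ----
theorem parent0_step (case_ids : List String) (z : String) :
    ufStep ((case_ids.foldl (fun d x => d.insert x x) .empty)) z = z := by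
  have aux : ∀ (l : List String) (d : PySem.Dict String String),
      (∀ z, ufStep d z = z) → ∀ z, ufStep (l.foldl (fun d x => d.insert x x) d) z = z := by
    intro l
    induction l with
    | nil => intro d h z; exact h z
    | cons c t ih =>
      intro d h z
      apply ih
      intro w
      rw [ufStep_insert]
      by_cases hw : w = c
      · rw [if_pos hw, hw]
      · rw [if_neg hw]; exact h w
  exact aux case_ids .empty (fun z => by simp [ufStep]) z

theorem parent0_good (case_ids : List String) :
    Good (PySem.Set.ofList case_ids) (case_ids.foldl (fun d x => d.insert x x) .empty) := by
  refine ⟨?_, ?_, ?_⟩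
  · rw [PySem.Dict.keys_foldl_insert, PySem.Dict.keys_empty, PySem.Set.update_nil_left]
  · intro y hy; rw [parent0_step]; exact hy
  · intro y
    exact ⟨y, ⟨⟨0, rfl⟩, parent0_step case_ids y⟩⟩

theorem parent0_rootEq (case_ids : List String) (x y : String) :
    RootEq (case_ids.foldl (fun d x => d.insert x x) .empty) x y ↔ x = y := by
  constructor
  · rintro ⟨r, ⟨⟨k, hk⟩, _⟩, ⟨⟨k', hk'⟩, _⟩⟩
    have hall : ∀ (j : Nat) (z : String),
        ufIter (case_ids.foldl (fun d x => d.insert x x) .empty) j z = z := by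
      intro j
      induction j with
      | zero => intro z; rfl
      | succ m ih => intro z; rw [ufIter_succ_out, ih, parent0_step]
    rw [hall] at hk hk'
    exact hk.trans hk'.symm
  · rintro rfl
    exact ⟨x, ⟨⟨0, rfl⟩, parent0_step case_ids x⟩, ⟨⟨0, rfl⟩, parent0_step case_ids x⟩⟩

-- ---- the B-side label dict ----
theorem getD_indep {d : PySem.Dict String String} (_hnd : d.keys.Nodup) {x : String}
    (hx : x ∈ d.keys) (c c' : String) : d.getD x c = d.getD x c' := by
  cases ho : d.get? x with
  | none =>
    exact absurd ((PySem.Dict.get?_eq_none_iff_not_mem_keys d x).mp ho) (by simpa using hx)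
  | some v =>
    rw [PySem.Dict.getD_of_get?_eq_some d c ho, PySem.Dict.getD_of_get?_eq_some d c' ho]

theorem relabelB_items (l : PySem.Dict String String) (hnd : l.keys.Nodup) (la lb : String) :
    (relabelB l la lb).items = l.items.map (fun p => (p.1, if p.2 = lb then la else p.2)) := by
  unfold relabelB
  rw [PySem.Dict.items_foldl_insert_fresh]
  · rw [show (PySem.Dict.empty : PySem.Dict String String).items = [] from rfl,
      List.nil_append]
  · intro p hp; simp [PySem.Dict.contains_empty]
  · have h : l.items.map (fun p => p.1) = l.keys := rfl
    rw [h]; exact hnd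

theorem relabelB_keys (l : PySem.Dict String String) (hnd : l.keys.Nodup) (la lb : String) :
    (relabelB l la lb).keys = l.keys := by
  have h := relabelB_items l hnd la lb
  show (relabelB l la lb).items.map Prod.fst = l.items.map Prod.fst
  rw [h, List.map_map]
  rfl

theorem relabelB_getD (l : PySem.Dict String String) (hnd : l.keys.Nodup) (la lb : String)
    {x : String} (hx : x ∈ l.keys) (c : String) :
    (relabelB l la lb).getD x c = if l.getD x c = lb then la else l.getD x c := by
  have hnd' : (relabelB l la lb).keys.Nodup := by rw [relabelB_keys l hnd]; exact hnd
  cases ho : l.get? x with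
  | none =>
    exact absurd ((PySem.Dict.get?_eq_none_iff_not_mem_keys l x).mp ho) (by simpa using hx)
  | some v =>
    have hmem : (x, v) ∈ l.items := PySem.Dict.mem_items_of_get?_eq_some _ ho
    have hmem' : (x, if v = lb then la else v) ∈ (relabelB l la lb).items := by
      rw [relabelB_items l hnd la lb]
      exact List.mem_map.mpr ⟨(x, v), hmem, rfl⟩
    rw [PySem.Dict.getD_of_mem_items _ hmem' hnd', PySem.Dict.getD_of_get?_eq_some l c ho]


theorem ite_merge_iff {u v A B : String} (hne : A ≠ B) :
    ((if u = B then A else u) = (if v = B then A else v)) ↔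
      (u = v ∨ (u = A ∧ B = v) ∨ (u = B ∧ A = v)) := by
  by_cases h1 : u = B
  · by_cases h2 : v = B
    · rw [if_pos h1, if_pos h2]
      simp [h1, h2]
    · rw [if_pos h1, if_neg h2]
      constructor
      · intro h; exact Or.inr (Or.inr ⟨h1, h⟩)
      · rintro (h | ⟨hA, hB⟩ | ⟨_, hA⟩)
        · exact absurd (h.symm.trans h1) h2
        · exact absurd (hA.symm.trans h1) hne
        · exact hA
  · by_cases h2 : v = B
    · rw [if_neg h1, if_pos h2]
      constructor
      · intro h; exact Or.inr (Or.inl ⟨h, h2.symm⟩)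
      · rintro (h | ⟨hA, _⟩ | ⟨hB, _⟩)
        · exact absurd (h.trans h2) h1
        · exact hA
        · exact absurd hB h1
    · rw [if_neg h1, if_neg h2]
      constructor
      · intro h; exact Or.inl h
      · rintro (h | ⟨_, hB⟩ | ⟨hB, _⟩)
        · exact h
        · exact absurd hB.symm h2
        · exact absurd hB h1

theorem relabel_valEq {K : List String} {l : PySem.Dict String String}
    (hkeys : l.keys = K) (hnd : K.Nodup) {a b : String} (ha : a ∈ K) (hb : b ∈ K)
    (hne : l.getD a "" ≠ l.getD b "") {x y : String} (hx : x ∈ K) (hy : y ∈ K) :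
    valEq (relabelB l (l.getD a "") (l.getD b "")) x y ↔ mergeRel (valEq l) a b x y := by
  have hndl : l.keys.Nodup := by rw [hkeys]; exact hnd
  have hxk : x ∈ l.keys := by rw [hkeys]; exact hx
  have hyk : y ∈ l.keys := by rw [hkeys]; exact hy
  have hak : a ∈ l.keys := by rw [hkeys]; exact ha
  have hbk : b ∈ l.keys := by rw [hkeys]; exact hb
  have hla : l.getD a a = l.getD a "" := getD_indep hndl hak a ""
  have hlb : l.getD b b = l.getD b "" := getD_indep hndl hbk b ""
  simp only [valEq, mergeRel]
  rw [relabelB_getD l hndl _ _ hxk x, relabelB_getD l hndl _ _ hyk y, hla, hlb]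
  exact ite_merge_iff hne

-- ---- the simultaneous edge fold ----
theorem foldSim {K : List String} (hK : K.Nodup) (mbc : Int) :
    ∀ (its : List ((String × String) × Int))
      (stA : PySem.Dict String String × PySem.Dict String Int) (lB : PySem.Dict String String),
      Good K stA.1 → lB.keys = K → (∀ p ∈ its, p.1.1 ∈ K ∧ p.1.2 ∈ K) →
      (∀ x y, x ∈ K → y ∈ K → (RootEq stA.1 x y ↔ valEq lB x y)) →
      Good K (its.foldl (fun st it => if mbc ≤ it.2 then unionA st it.1.1 it.1.2 else st) stA).1 ∧
      (its.foldl (fun l it => if mbc ≤ it.2 then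
          (if l.getD it.1.1 "" = l.getD it.1.2 "" then l
           else relabelB l (l.getD it.1.1 "") (l.getD it.1.2 "")) else l) lB).keys = K ∧
      ∀ x y, x ∈ K → y ∈ K →
        (RootEq (its.foldl (fun st it => if mbc ≤ it.2 then unionA st it.1.1 it.1.2 else st) stA).1 x y ↔
         valEq (its.foldl (fun l it => if mbc ≤ it.2 then
          (if l.getD it.1.1 "" = l.getD it.1.2 "" then l
           else relabelB l (l.getD it.1.1 "") (l.getD it.1.2 "")) else l) lB) x y) := by
  intro its
  induction its with
  | nil =>
    intro stA lB hg hkeys hmem hinv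
    exact ⟨hg, hkeys, hinv⟩
  | cons it t ih =>
    intro stA lB hg hkeys hmem hinv
    have hndB : lB.keys.Nodup := by rw [hkeys]; exact hK
    simp only [List.foldl_cons]
    by_cases hc : mbc ≤ it.2
    · rw [if_pos hc, if_pos hc]
      have haK : it.1.1 ∈ K := (hmem it (List.mem_cons_self)).1
      have hbK : it.1.2 ∈ K := (hmem it (List.mem_cons_self)).2
      obtain ⟨hgu, hru⟩ := unionA_spec hK stA hg haK hbK
      by_cases heq : lB.getD it.1.1 "" = lB.getD it.1.2 ""
      · rw [if_pos heq]
        have hab : RootEq stA.1 it.1.1 it.1.2 := by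
          apply (hinv _ _ haK hbK).2
          unfold valEq
          rw [getD_indep hndB (by rw [hkeys]; exact haK) it.1.1 "",
            getD_indep hndB (by rw [hkeys]; exact hbK) it.1.2 ""]
          exact heq
        refine ih (unionA stA it.1.1 it.1.2) lB hgu hkeys
          (fun p hp => hmem p (List.mem_cons_of_mem _ hp)) ?_
        intro x y hx hy
        rw [hru x y, mergeRel_self hab]
        exact hinv x y hx hy
      · rw [if_neg heq]
        refine ih (unionA stA it.1.1 it.1.2) _ hgu
          (by rw [relabelB_keys lB hndB]; exact hkeys)
          (fun p hp => hmem p (List.mem_cons_of_mem _ hp)) ?_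
        intro x y hx hy
        rw [hru x y]
        have h1 : mergeRel (RootEq stA.1) it.1.1 it.1.2 x y ↔
            mergeRel (valEq lB) it.1.1 it.1.2 x y := by
          unfold mergeRel
          rw [hinv x y hx hy, hinv x it.1.1 hx haK, hinv it.1.2 y hbK hy,
            hinv x it.1.2 hx hbK, hinv it.1.1 y haK hy]
        rw [h1]
        exact (relabel_valEq hkeys hK haK hbK heq hx hy).symm
    · rw [if_neg hc, if_neg hc]
      exact ih stA lB hg hkeys (fun p hp => hmem p (List.mem_cons_of_mem _ hp)) hinv

-- ---- the computable root function ----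
noncomputable def rootfD (d : PySem.Dict String String) (x : String) : String :=
  @dite _ (∃ k, ufStep d (ufIter d k x) = ufIter d k x) (Classical.propDecidable _)
    (fun h => ufIter d (Nat.find h) x) (fun _ => x)

theorem rootfD_reach {d : PySem.Dict String String} (htot : ∀ z, ∃ r, Reach d z r)
    (x : String) : Reach d x (rootfD d x) := by
  obtain ⟨r, ⟨⟨k, hk⟩, hr⟩⟩ := htot x
  have hex : ∃ j, ufStep d (ufIter d j x) = ufIter d j x := ⟨k, by rw [hk]; exact hr⟩
  unfold rootfD
  rw [dif_pos hex]
  exact ⟨⟨Nat.find hex, rfl⟩, Nat.find_spec hex⟩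

theorem reach_rootfD {d : PySem.Dict String String} {x r : String} (htot : ∀ z, ∃ r, Reach d z r)
    (h : Reach d x r) : r = rootfD d x :=
  reach_unique h (rootfD_reach htot x)

-- ---- A's grouping loop is a pure fold over the fixed root function ----
theorem groupFoldA {K : List String} (hK : K.Nodup) (pA : PySem.Dict String String)
    (l : List String) :
    ∀ (p : PySem.Dict String String) (groups : PySem.Dict String (List String)),
      Good K p → (∀ y r, Reach p y r ↔ Reach pA y r) →
      (l.foldl (fun (st : PySem.Dict String String × PySem.Dict String (List String)) cid =>
          ((findA st.1.size st.1 cid).1,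
            st.2.modify (findA st.1.size st.1 cid).2 [] (· ++ [cid]))) (p, groups)).2
        = l.foldl (fun g cid => g.modify (rootfD pA cid) [] (· ++ [cid])) groups := by
  induction l with
  | nil => intro p groups _ _; rfl
  | cons cid t ih =>
    intro p groups hgp hiff
    simp only [List.foldl_cons]
    have hsz : p.size = K.length := by rw [dict_size_eq_keys_length, hgp.1]
    obtain ⟨hg', hrf, hiff'⟩ :=
      findA_spec hK p.size p cid hgp (by rw [hsz]; exact good_depth hK hgp cid)
    have htotA : ∀ z, ∃ r, Reach pA z r := by
      intro z
      obtain ⟨r, hr⟩ := hgp.2.2 z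
      exact ⟨r, (hiff z r).mp hr⟩
    have hroot : (findA p.size p cid).2 = rootfD pA cid :=
      reach_rootfD htotA ((hiff _ _).mp hrf)
    rw [hroot]
    exact ih (findA p.size p cid).1 _ hg' (fun y r => (hiff' y r).trans (hiff y r))

-- ---- grouping by equivalent key functions gives equal value lists ----
def repsF (f : String → String) (l : List String) : List String :=
  l.foldl (fun acc c => if acc.any (fun r => f r == f c) then acc else acc ++ [c]) []

def groupF (f : String → String) (l : List String) : PySem.Dict String (List String) :=
  l.foldl (fun d c => d.modify (f c) [] (· ++ [c])) .empty

theorem repsF_append (f : String → String) (l : List String) (c : String) :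
    repsF f (l ++ [c]) = if (repsF f l).any (fun r => f r == f c) then repsF f l
      else repsF f l ++ [c] := by
  simp [repsF, List.foldl_append]

theorem mem_of_mem_repsF {f : String → String} {l : List String} {r : String}
    (h : r ∈ repsF f l) : r ∈ l := by
  have aux : ∀ (l : List String) (acc : List String) (r : String),
      r ∈ l.foldl (fun acc c => if acc.any (fun r => f r == f c) then acc else acc ++ [c]) acc →
      r ∈ acc ∨ r ∈ l := by
    intro l
    induction l with
    | nil => intro acc r hr; exact Or.inl hr
    | cons c t ih =>
      intro acc r hr
      simp only [List.foldl_cons] at hr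
      by_cases hany : (acc.any fun r => f r == f c) = true
      · rw [if_pos hany] at hr
        rcases ih _ r hr with h1 | h1
        · exact Or.inl h1
        · exact Or.inr (List.mem_cons_of_mem _ h1)
      · rw [if_neg hany] at hr
        rcases ih _ r hr with h1 | h1
        · rcases List.mem_append.mp h1 with h2 | h2
          · exact Or.inl h2
          · simp at h2; simp [h2]
        · exact Or.inr (List.mem_cons_of_mem _ h1)
  rcases aux l [] r h with h1 | h1
  · exact absurd h1 (List.not_mem_nil)
  · exact h1

theorem repsF_covers {f : String → String} {l : List String} {p : String} (hp : p ∈ l) :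
    ∃ r ∈ repsF f l, f r = f p := by
  have aux_sub : ∀ (l acc : List String),
      acc ⊆ l.foldl (fun acc c => if acc.any (fun r => f r == f c) then acc else acc ++ [c]) acc := by
    intro l
    induction l with
    | nil => intro acc x hx; exact hx
    | cons c t ih =>
      intro acc x hx
      simp only [List.foldl_cons]
      apply ih
      show x ∈ if (acc.any fun r => f r == f c) = true then acc else acc ++ [c]
      by_cases hany : (acc.any fun r => f r == f c) = true
      · rw [if_pos hany]; exact hx
      · rw [if_neg hany]; exact List.mem_append_left _ hx
  have aux : ∀ (l acc : List String) (p : String), p ∈ l →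
      ∃ r ∈ l.foldl (fun acc c => if acc.any (fun r => f r == f c) then acc else acc ++ [c]) acc,
        f r = f p := by
    intro l
    induction l with
    | nil => intro acc p hp; exact absurd hp (List.not_mem_nil)
    | cons c t ih =>
      intro acc p hp
      rcases List.mem_cons.mp hp with hpc | hpt
      · simp only [List.foldl_cons]
        by_cases hany : (acc.any fun r => f r == f c) = true
        · obtain ⟨r0, hr0, hbeq⟩ := List.any_eq_true.mp hany
          refine ⟨r0, ?_, by rw [hpc]; exact eq_of_beq hbeq⟩
          apply aux_sub
          show r0 ∈ if (acc.any fun r => f r == f c) = true then acc else acc ++ [c]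
          rw [if_pos hany]; exact hr0
        · refine ⟨c, ?_, by rw [hpc]⟩
          apply aux_sub
          show c ∈ if (acc.any fun r => f r == f c) = true then acc else acc ++ [c]
          rw [if_neg hany]
          exact List.mem_append_right _ (by simp)
      · simp only [List.foldl_cons]
        exact ih _ p hpt
  exact aux l [] p hp

theorem any_repsF_iff (f : String → String) (l : List String) (c : String) :
    (repsF f l).any (fun r => f r == f c) = true ↔ ∃ p ∈ l, f p = f c := by
  constructor
  · intro h
    obtain ⟨r, hr, hbeq⟩ := List.any_eq_true.mp h
    exact ⟨r, mem_of_mem_repsF hr, eq_of_beq hbeq⟩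
  · rintro ⟨p, hp, hfp⟩
    obtain ⟨r, hr, hfr⟩ := repsF_covers hp
    exact List.any_eq_true.mpr ⟨r, hr, beq_iff_eq.mpr (hfr.trans hfp)⟩

theorem filter_pred_singleton (p : String → Bool) (c : String) :
    List.filter p [c] = if p c = true then [c] else [] := by
  by_cases h : p c = true <;> simp [h]

theorem groupF_getD (f : String → String) (l : List String) (k : String) :
    (groupF f l).getD k [] = l.filter (fun y => f y == k) := by
  induction l using List.reverseRecOn with
  | nil => rfl
  | append_singleton l c ih =>
    have hstep : groupF f (l ++ [c]) =
        (groupF f l).insert (f c) ((groupF f l).getD (f c) [] ++ [c]) := by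
      unfold groupF
      rw [List.foldl_append]
      rfl
    rw [hstep, PySem.Dict.getD_insert, List.filter_append, filter_pred_singleton]
    by_cases hk : k = f c
    · subst hk
      rw [if_pos rfl, ih, if_pos (by simp)]
    · rw [if_neg hk, ih, if_neg (by simp; exact fun h => hk h.symm), List.append_nil]

theorem groupF_contains (f : String → String) (l : List String) (k : String) :
    (groupF f l).contains k = true ↔ ∃ p ∈ l, f p = k := by
  unfold groupF
  rw [PySem.Dict.contains_iff_mem_keys,
    PySem.Dict.keys_foldl_modify_key l f [] (fun _ x => fun v => v ++ [x]) .empty,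
    PySem.Dict.keys_empty, PySem.Set.update_nil_left, PySem.Set.mem_ofList, List.mem_map]

theorem groupF_items (f : String → String) (l : List String) :
    (groupF f l).items = (repsF f l).map (fun r => (f r, l.filter (fun y => f y == f r))) := by
  induction l using List.reverseRecOn with
  | nil => rfl
  | append_singleton l c ih =>
    have hstep : groupF f (l ++ [c]) =
        (groupF f l).insert (f c) ((groupF f l).getD (f c) [] ++ [c]) := by
      unfold groupF
      rw [List.foldl_append]
      rfl
    rw [hstep]
    by_cases hctn : (groupF f l).contains (f c) = true
    · have hex : ∃ p ∈ l, f p = f c := (groupF_contains f l (f c)).mp hctn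
      rw [PySem.Dict.items_insert_of_contains _ _ hctn, ih, List.map_map,
        repsF_append, if_pos ((any_repsF_iff f l c).mpr hex)]
      apply List.map_congr_left
      intro r hr
      have hrl := mem_of_mem_repsF hr
      simp only [Function.comp]
      by_cases hrc : (f r == f c) = true
      · have hfrc : f r = f c := eq_of_beq hrc
        rw [if_pos hrc, groupF_getD, List.filter_append, hfrc,
          filter_pred_singleton, if_pos (by simp)]
      · have hfrc : f c ≠ f r := fun h => hrc (beq_iff_eq.mpr h.symm)
        rw [if_neg (by simpa using hrc), List.filter_append,
          filter_pred_singleton, if_neg (by simp; exact hfrc), List.append_nil]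
    · have hnex : ¬ ∃ p ∈ l, f p = f c := fun h =>
        hctn ((groupF_contains f l (f c)).mpr h)
      rw [PySem.Dict.items_insert_of_not_contains _ _ (by simpa using hctn), ih,
        repsF_append, if_neg (fun h => hnex ((any_repsF_iff f l c).mp h)), List.map_append]
      congr 1
      · apply List.map_congr_left
        intro r hr
        have hrl := mem_of_mem_repsF hr
        rw [List.filter_append, filter_pred_singleton,
          if_neg (by simp; intro h; exact absurd ⟨r, hrl, h.symm⟩ hnex), List.append_nil]
      · simp only [List.map_cons, List.map_nil]
        rw [groupF_getD, List.filter_append, filter_pred_singleton, if_pos (by simp)]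

theorem repsF_congr {f g : String → String} {l : List String}
    (h : ∀ x ∈ l, ∀ y ∈ l, f x = f y ↔ g x = g y) : repsF f l = repsF g l := by
  induction l using List.reverseRecOn with
  | nil => rfl
  | append_singleton l c ih =>
    have h' : ∀ x ∈ l, ∀ y ∈ l, f x = f y ↔ g x = g y := fun x hx y hy =>
      h x (List.mem_append_left _ hx) y (List.mem_append_left _ hy)
    have hcl : c ∈ l ++ [c] := by simp
    rw [repsF_append, repsF_append, ih h']
    have hcond : ((repsF g l).any (fun r => f r == f c)) =
        ((repsF g l).any (fun r => g r == g c)) := by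
      rw [Bool.eq_iff_iff, List.any_eq_true, List.any_eq_true]
      constructor
      · rintro ⟨r, hr, hbeq⟩
        refine ⟨r, hr, beq_iff_eq.mpr ?_⟩
        exact (h r (List.mem_append_left _ (mem_of_mem_repsF hr)) c hcl).mp (eq_of_beq hbeq)
      · rintro ⟨r, hr, hbeq⟩
        refine ⟨r, hr, beq_iff_eq.mpr ?_⟩
        exact (h r (List.mem_append_left _ (mem_of_mem_repsF hr)) c hcl).mpr (eq_of_beq hbeq)
    rw [hcond]

theorem groupF_values_congr {f g : String → String} {l : List String}
    (h : ∀ x ∈ l, ∀ y ∈ l, f x = f y ↔ g x = g y) :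
    (groupF f l).values = (groupF g l).values := by
  have hv : ∀ (f : String → String),
      (groupF f l).values = (groupF f l).items.map (fun p => p.2) := fun _ => rfl
  rw [hv, hv, groupF_items, groupF_items, List.map_map, List.map_map, repsF_congr h]
  apply List.map_congr_left
  intro r hr
  have hrl := mem_of_mem_repsF hr
  simp only [Function.comp]
  apply List.filter_congr
  intro y hy
  rw [Bool.eq_iff_iff, beq_iff_eq, beq_iff_eq]
  exact h y hy r hrl

-- ---- the two bucket dicts and pair-hit dicts coincide ----
theorem buckets_eq (case_ids : List String) (sigd : PySem.Dict String Int)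
    (bands rows mask : Int) :
    (case_ids.foldl (fun bks cid =>
        (PySem.List.pyRange 0 bands 1).foldl (fun bks band =>
          bks.modify (band, PySem.Int.band (sigd.getD cid 0 >>> (band * rows).toNat) mask)
            [] (· ++ [cid])) bks) .empty : PySem.Dict (Int × Int) (List String))
    = ((case_ids.flatMap (fun c => (PySem.List.pyRange 0 bands 1).map (fun b => (c, b)))).foldl
        (fun bks cb =>
          bks.insert (cb.2, PySem.Int.band (sigd.getD cb.1 0 >>> (cb.2 * rows).toNat) mask)
            (bks.getD (cb.2, PySem.Int.band (sigd.getD cb.1 0 >>> (cb.2 * rows).toNat) mask) [] ++ [cb.1]))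
        .empty : PySem.Dict (Int × Int) (List String)) := by
  rw [List.foldl_flatMap]
  apply PySem.List.foldl_congr_mem
  intro acc cid _
  rw [List.foldl_map]
  rfl

theorem minmax_eq (a b : String) :
    (min a b, max a b) = if a < b then (a, b) else (b, a) := by
  by_cases h : a < b
  · rw [if_pos h, min_eq_left h.le, max_eq_right h.le]
  · have hba : b ≤ a := not_lt.mp h
    rw [if_neg h, min_eq_right hba, max_eq_left hba]

theorem pair_step_eq (members : List String) (ph : PySem.Dict (String × String) Int) :
    (if members.length < 2 then ph
      else (PySem.List.pyRange 0 (members.length : Int) 1).foldl (fun ph i =>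
        (PySem.List.pyRange (i+1) (members.length : Int) 1).foldl (fun ph j =>
          ph.modify (if PySem.List.pyGetD members i "" < PySem.List.pyGetD members j ""
            then (PySem.List.pyGetD members i "", PySem.List.pyGetD members j "")
            else (PySem.List.pyGetD members j "", PySem.List.pyGetD members i "")) 0 (· + 1)) ph) ph)
    = (PySem.List.enumerate members 0).foldl (fun ph ia =>
        (PySem.List.slice members (some (ia.1 + 1)) none).foldl (fun ph b =>
          ph.insert (min ia.2 b, max ia.2 b) (ph.getD (min ia.2 b, max ia.2 b) 0 + 1)) ph) ph := by
  match members with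
  | [] => rfl
  | [m] => rfl
  | m1 :: m2 :: rest =>
    rw [if_neg (by simp)]
    rw [PySem.List.enumerate_eq_map_pyRange (m1 :: m2 :: rest) "", List.foldl_map]
    have hlen : PySem.List.len (m1 :: m2 :: rest) = ((m1 :: m2 :: rest).length : Int) := rfl
    rw [hlen]
    apply PySem.List.foldl_congr_mem
    intro acc i hi
    have hi0 : (0:Int) ≤ i := (PySem.List.mem_pyRange_one.mp hi).1
    show _ = List.foldl _ acc (PySem.List.slice (m1 :: m2 :: rest) (some (i + 1)) none)
    rw [PySem.List.slice_from _ (by omega : (0:Int) ≤ i + 1)]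
    rw [← PySem.List.foldl_pyRange_pyGetD (m1 :: m2 :: rest) ""
      (fun acc b => acc.insert (min (PySem.List.pyGetD (m1 :: m2 :: rest) i "") b,
          max (PySem.List.pyGetD (m1 :: m2 :: rest) i "") b)
        (acc.getD (min (PySem.List.pyGetD (m1 :: m2 :: rest) i "") b,
          max (PySem.List.pyGetD (m1 :: m2 :: rest) i "") b) 0 + 1)) acc
      (by omega : (0:Int) ≤ i + 1), hlen]
    apply PySem.List.foldl_congr_mem
    intro acc2 j _
    rw [minmax_eq]
    rfl

-- ---- every pair key consists of case ids ----
theorem pair_keys_mem (case_ids : List String) (buckets : PySem.Dict (Int × Int) (List String))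
    (hb : ∀ v ∈ buckets.values, ∀ m ∈ v, m ∈ case_ids) :
    ∀ p ∈ (buckets.values.foldl
      (fun ph members =>
      (PySem.List.enumerate members 0).foldl (fun ph ia =>
        (PySem.List.slice members (some (ia.1 + 1)) none).foldl (fun ph b =>
          ph.insert (min ia.2 b, max ia.2 b) (ph.getD (min ia.2 b, max ia.2 b) 0 + 1)) ph) ph)
      (.empty : PySem.Dict (String × String) Int)).items,
      p.1.1 ∈ case_ids ∧ p.1.2 ∈ case_ids := by
  have hins : ∀ (ph : PySem.Dict (String × String) Int) (k : String × String) (v : Int),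
      (∀ p ∈ ph.items, p.1.1 ∈ case_ids ∧ p.1.2 ∈ case_ids) →
      k.1 ∈ case_ids → k.2 ∈ case_ids →
      ∀ p ∈ (ph.insert k v).items, p.1.1 ∈ case_ids ∧ p.1.2 ∈ case_ids := by
    intro ph k v hph hk1 hk2 p hp
    rcases (PySem.Dict.mem_items_insert ph k v p).mp hp with h | h
    · rw [h]; exact ⟨hk1, hk2⟩
    · exact hph p h.1
  have hinner : ∀ (bs : List String) (ph : PySem.Dict (String × String) Int) (a : String),
      a ∈ case_ids → (∀ b ∈ bs, b ∈ case_ids) →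
      (∀ p ∈ ph.items, p.1.1 ∈ case_ids ∧ p.1.2 ∈ case_ids) →
      ∀ p ∈ (bs.foldl (fun ph b =>
          ph.insert (min a b, max a b) (ph.getD (min a b, max a b) 0 + 1)) ph).items,
        p.1.1 ∈ case_ids ∧ p.1.2 ∈ case_ids := by
    intro bs
    induction bs with
    | nil => intro ph a _ _ hph; exact hph
    | cons b t ih =>
      intro ph a ha hbs hph
      simp only [List.foldl_cons]
      apply ih _ a ha (fun x hx => hbs x (List.mem_cons_of_mem _ hx))
      apply hins _ _ _ hph
      · rcases min_choice a b with h | h <;> rw [h]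
        · exact ha
        · exact hbs b List.mem_cons_self
      · rcases max_choice a b with h | h <;> rw [h]
        · exact ha
        · exact hbs b List.mem_cons_self
  have hmid : ∀ (members : List String) (es : List (Int × String))
      (ph : PySem.Dict (String × String) Int),
      (∀ m ∈ members, m ∈ case_ids) → (∀ e ∈ es, e.2 ∈ members) →
      (∀ p ∈ ph.items, p.1.1 ∈ case_ids ∧ p.1.2 ∈ case_ids) →
      ∀ p ∈ (es.foldl (fun ph ia =>
          (PySem.List.slice members (some (ia.1 + 1)) none).foldl (fun ph b =>
            ph.insert (min ia.2 b, max ia.2 b) (ph.getD (min ia.2 b, max ia.2 b) 0 + 1)) ph) ph).items,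
        p.1.1 ∈ case_ids ∧ p.1.2 ∈ case_ids := by
    intro members es
    induction es with
    | nil => intro ph _ _ hph; exact hph
    | cons e t ih =>
      intro ph hmem hes hph
      simp only [List.foldl_cons]
      apply ih _ hmem (fun x hx => hes x (List.mem_cons_of_mem _ hx))
      apply hinner _ _ _ (hmem _ (hes e List.mem_cons_self))
        (fun b hbm => hmem b (PySem.List.mem_of_mem_slice _ _ _ hbm)) hph
  have houter : ∀ (vs : List (List String)) (ph : PySem.Dict (String × String) Int),
      (∀ v ∈ vs, ∀ m ∈ v, m ∈ case_ids) →
      (∀ p ∈ ph.items, p.1.1 ∈ case_ids ∧ p.1.2 ∈ case_ids) →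
      ∀ p ∈ (vs.foldl
        (fun ph members =>
      (PySem.List.enumerate members 0).foldl (fun ph ia =>
        (PySem.List.slice members (some (ia.1 + 1)) none).foldl (fun ph b =>
          ph.insert (min ia.2 b, max ia.2 b) (ph.getD (min ia.2 b, max ia.2 b) 0 + 1)) ph) ph) ph).items,
        p.1.1 ∈ case_ids ∧ p.1.2 ∈ case_ids := by
    intro vs
    induction vs with
    | nil => intro ph _ hph; exact hph
    | cons v t ih =>
      intro ph hvs hph
      simp only [List.foldl_cons]
      apply ih _ (fun w hw => hvs w (List.mem_cons_of_mem _ hw))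
      apply hmid v (PySem.List.enumerate v 0) ph (hvs v List.mem_cons_self)
        (fun e he => ?_) hph
      obtain ⟨k, hk, hek⟩ := (PySem.List.mem_enumerate_iff v 0 e).mp he
      rw [hek]
      exact List.getElem_mem hk
  exact houter buckets.values .empty hb (by
    intro p hp
    rw [show (PySem.Dict.empty : PySem.Dict (String × String) Int).items = [] from rfl] at hp
    exact absurd hp (List.not_mem_nil))

theorem getD_values_cases (d : PySem.Dict (Int × Int) (List String)) (k : Int × Int) :
    d.getD k [] = [] ∨ d.getD k [] ∈ d.values := by
  cases ho : d.get? k with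
  | none => exact Or.inl (PySem.Dict.getD_of_get?_eq_none d [] ho)
  | some v =>
    right
    rw [PySem.Dict.getD_of_get?_eq_some d [] ho]
    exact List.mem_map.mpr ⟨(k, v), PySem.Dict.mem_items_of_get?_eq_some _ ho, rfl⟩

theorem buckets_values_mem (case_ids : List String) (sigd : PySem.Dict String Int)
    (bands rows mask : Int) :
    ∀ v ∈ ((case_ids.foldl (fun bks cid =>
        (PySem.List.pyRange 0 bands 1).foldl (fun bks band =>
          bks.modify (band, PySem.Int.band (sigd.getD cid 0 >>> (band * rows).toNat) mask)
            [] (· ++ [cid])) bks) .empty : PySem.Dict (Int × Int) (List String))).values, ∀ m ∈ v, m ∈ case_ids := by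
  have hins : ∀ (d : PySem.Dict (Int × Int) (List String)) (k : Int × Int) (c : String),
      (∀ v ∈ d.values, ∀ m ∈ v, m ∈ case_ids) → c ∈ case_ids →
      ∀ v ∈ (d.insert k (d.getD k [] ++ [c])).values, ∀ m ∈ v, m ∈ case_ids := by
    intro d k c hd hc v hv m hm
    rcases PySem.Dict.mem_values_insert _ _ _ _ hv with h | h
    · rw [h] at hm
      rcases List.mem_append.mp hm with h1 | h1
      · rcases getD_values_cases d k with h2 | h2
        · rw [h2] at h1; exact absurd h1 (List.not_mem_nil)
        · exact hd _ h2 m h1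
      · simp at h1; rw [h1]; exact hc
    · exact hd v h m hm
  have hinner : ∀ (is : List Int) (d : PySem.Dict (Int × Int) (List String)) (c : String),
      (∀ v ∈ d.values, ∀ m ∈ v, m ∈ case_ids) → c ∈ case_ids →
      ∀ v ∈ (is.foldl (fun bks band =>
          bks.modify (band, PySem.Int.band (sigd.getD c 0 >>> (band * rows).toNat) mask)
            [] (· ++ [c])) d).values, ∀ m ∈ v, m ∈ case_ids := by
    intro is
    induction is with
    | nil => intro d c hd _; exact hd
    | cons i t ih =>
      intro d c hd hc
      simp only [List.foldl_cons]
      exact ih _ c (hins d _ c hd hc) hc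
  have houter : ∀ (l : List String) (d : PySem.Dict (Int × Int) (List String)),
      (∀ c ∈ l, c ∈ case_ids) → (∀ v ∈ d.values, ∀ m ∈ v, m ∈ case_ids) →
      ∀ v ∈ (l.foldl (fun bks cid =>
        (PySem.List.pyRange 0 bands 1).foldl (fun bks band =>
          bks.modify (band, PySem.Int.band (sigd.getD cid 0 >>> (band * rows).toNat) mask)
            [] (· ++ [cid])) bks) d).values, ∀ m ∈ v, m ∈ case_ids := by
    intro l
    induction l with
    | nil => intro d _ hd; exact hd
    | cons c t ih =>
      intro d hl hd
      simp only [List.foldl_cons]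
      exact ih _ (fun x hx => hl x (List.mem_cons_of_mem _ hx))
        (hinner (PySem.List.pyRange 0 bands 1) d c hd (hl c List.mem_cons_self))
  exact houter case_ids .empty (fun c hc => hc) (by
    intro v hv
    rw [show (PySem.Dict.empty : PySem.Dict (Int × Int) (List String)).values = [] from rfl] at hv
    exact absurd hv (List.not_mem_nil))

theorem pair_hits_eq (case_ids : List String) (sigd : PySem.Dict String Int)
    (bands rows mask : Int) :
    ((case_ids.foldl (fun bks cid =>
        (PySem.List.pyRange 0 bands 1).foldl (fun bks band =>
          bks.modify (band, PySem.Int.band (sigd.getD cid 0 >>> (band * rows).toNat) mask)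
            [] (· ++ [cid])) bks) .empty : PySem.Dict (Int × Int) (List String))).values.foldl
      (fun (ph : PySem.Dict (String × String) Int) (members : List String) =>
      if members.length < 2 then ph
      else (PySem.List.pyRange 0 (members.length : Int) 1).foldl (fun ph i =>
        (PySem.List.pyRange (i+1) (members.length : Int) 1).foldl (fun ph j =>
          ph.modify (if PySem.List.pyGetD members i "" < PySem.List.pyGetD members j ""
            then (PySem.List.pyGetD members i "", PySem.List.pyGetD members j "")
            else (PySem.List.pyGetD members j "", PySem.List.pyGetD members i "")) 0 (· + 1)) ph) ph) (.empty : PySem.Dict (String × String) Int)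
    = (((case_ids.flatMap (fun c => (PySem.List.pyRange 0 bands 1).map (fun b => (c, b)))).foldl
        (fun bks cb =>
          bks.insert (cb.2, PySem.Int.band (sigd.getD cb.1 0 >>> (cb.2 * rows).toNat) mask)
            (bks.getD (cb.2, PySem.Int.band (sigd.getD cb.1 0 >>> (cb.2 * rows).toNat) mask) [] ++ [cb.1]))
        .empty : PySem.Dict (Int × Int) (List String))).values.foldl
      (fun (ph : PySem.Dict (String × String) Int) (members : List String) =>
      (PySem.List.enumerate members 0).foldl (fun ph ia =>
        (PySem.List.slice members (some (ia.1 + 1)) none).foldl (fun ph b =>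
          ph.insert (min ia.2 b, max ia.2 b) (ph.getD (min ia.2 b, max ia.2 b) 0 + 1)) ph) ph) (.empty : PySem.Dict (String × String) Int) := by
  rw [← buckets_eq case_ids sigd bands rows mask]
  apply PySem.List.foldl_congr_mem
  intro acc members _
  exact pair_step_eq members acc

theorem groups_values_eq (case_ids : List String) (ph : PySem.Dict (String × String) Int)
    (mbc : Int) (hmem : ∀ p ∈ ph.items, p.1.1 ∈ case_ids ∧ p.1.2 ∈ case_ids) :
    (case_ids.foldl (fun (st : PySem.Dict String String × PySem.Dict String (List String)) cid =>
        ((findA st.1.size st.1 cid).1, st.2.modify (findA st.1.size st.1 cid).2 [] (· ++ [cid])))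
      ((ph.items.foldl (fun st it => if mbc ≤ it.2 then unionA st it.1.1 it.1.2 else st)
        (case_ids.foldl (fun d x => d.insert x x) .empty,
         case_ids.foldl (fun d x => d.insert x 0) .empty)).1,
       (.empty : PySem.Dict String (List String)))).2.values
    = (case_ids.foldl (fun (g : PySem.Dict String (List String)) cid =>
        g.modify ((ph.items.foldl (fun l it => if mbc ≤ it.2 then
            (if l.getD it.1.1 "" = l.getD it.1.2 "" then l
             else relabelB l (l.getD it.1.1 "") (l.getD it.1.2 "")) else l)
          (case_ids.foldl (fun d x => d.insert x x) .empty)).getD cid "") [] (· ++ [cid]))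
        (.empty : PySem.Dict String (List String))).values := by
  have hK : (PySem.Set.ofList case_ids).Nodup := PySem.Set.nodup_ofList case_ids
  have hg0 := parent0_good case_ids
  have hpairsK : ∀ p ∈ ph.items,
      p.1.1 ∈ PySem.Set.ofList case_ids ∧ p.1.2 ∈ PySem.Set.ofList case_ids :=
    fun p hp => ⟨(PySem.Set.mem_ofList _ _).mpr (hmem p hp).1,
      (PySem.Set.mem_ofList _ _).mpr (hmem p hp).2⟩
  have hinv0 : ∀ x y, x ∈ PySem.Set.ofList case_ids → y ∈ PySem.Set.ofList case_ids →
      (RootEq (case_ids.foldl (fun d x => d.insert x x) .empty) x y ↔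
       valEq (case_ids.foldl (fun d x => d.insert x x) .empty) x y) := by
    intro x y _ _
    rw [parent0_rootEq]
    have hstep : ∀ z, (case_ids.foldl (fun d x => d.insert x x)
        (.empty : PySem.Dict String String)).getD z z = z := fun z => parent0_step case_ids z
    unfold valEq
    rw [hstep, hstep]
  obtain ⟨hgood, hkeys, hinvf⟩ := foldSim hK mbc ph.items
    (case_ids.foldl (fun d x => d.insert x x) .empty,
     case_ids.foldl (fun d x => d.insert x 0) .empty)
    (case_ids.foldl (fun d x => d.insert x x) .empty) hg0 hg0.1 hpairsK hinv0
  rw [groupFoldA hK _ case_ids _ .empty hgood (fun y r => Iff.rfl)]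
  have htotA := hgood.2.2
  have hndlab : ((ph.items.foldl (fun l it => if mbc ≤ it.2 then
      (if l.getD it.1.1 "" = l.getD it.1.2 "" then l
       else relabelB l (l.getD it.1.1 "") (l.getD it.1.2 "")) else l)
      (case_ids.foldl (fun d x => d.insert x x) .empty)).keys).Nodup := by
    rw [hkeys]; exact hK
  refine groupF_values_congr ?_
  intro x hx y hy
  have hxK : x ∈ PySem.Set.ofList case_ids := (PySem.Set.mem_ofList _ _).mpr hx
  have hyK : y ∈ PySem.Set.ofList case_ids := (PySem.Set.mem_ofList _ _).mpr hy
  have h1 : rootfD (ph.items.foldl (fun st it => if mbc ≤ it.2 then unionA st it.1.1 it.1.2 else st)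
      (case_ids.foldl (fun d x => d.insert x x) .empty,
       case_ids.foldl (fun d x => d.insert x 0) .empty)).1 x
      = rootfD (ph.items.foldl (fun st it => if mbc ≤ it.2 then unionA st it.1.1 it.1.2 else st)
      (case_ids.foldl (fun d x => d.insert x x) .empty,
       case_ids.foldl (fun d x => d.insert x 0) .empty)).1 y ↔
      RootEq (ph.items.foldl (fun st it => if mbc ≤ it.2 then unionA st it.1.1 it.1.2 else st)
      (case_ids.foldl (fun d x => d.insert x x) .empty,
       case_ids.foldl (fun d x => d.insert x 0) .empty)).1 x y := by
    constructor
    · intro h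
      exact ⟨_, rootfD_reach htotA x, h ▸ rootfD_reach htotA y⟩
    · rintro ⟨r, hu, hv⟩
      rw [← reach_rootfD htotA hu, ← reach_rootfD htotA hv]
  rw [h1, hinvf x y hxK hyK]
  unfold valEq
  rw [getD_indep hndlab (by rw [hkeys]; exact hxK) x "",
    getD_indep hndlab (by rw [hkeys]; exact hyK) y ""]

-- ===== VERDICT (by name: the statement is the Claim_ definition above) =====
theorem lsh_cluster_spec : Claim_equal_lsh_cluster := by
  intro case_ids signatures bits bands mbc _ _
  show lsh_cluster case_ids signatures bits bands mbc
      = lsh_cluster_alt case_ids signatures bits bands mbc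
  have h1 := pair_hits_eq case_ids (PySem.Dict.ofList signatures) bands
    (PySem.Int.floordiv bits bands)
    (((1:Int) <<< (PySem.Int.floordiv bits bands).toNat) - 1)
  have hbv := buckets_values_mem case_ids (PySem.Dict.ofList signatures) bands
    (PySem.Int.floordiv bits bands)
    (((1:Int) <<< (PySem.Int.floordiv bits bands).toNat) - 1)
  rw [buckets_eq case_ids (PySem.Dict.ofList signatures) bands
    (PySem.Int.floordiv bits bands)
    (((1:Int) <<< (PySem.Int.floordiv bits bands).toNat) - 1)] at hbv
  have h2 := groups_values_eq case_ids _ mbc (pair_keys_mem case_ids _ hbv)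
  unfold lsh_cluster lsh_cluster_alt
  simp only [h1, h2]
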